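-- pv_equiv track=rewrite | github.com/ayoubabounakif/edX-Python | max_even_value_of_a_2D_list.py | max_even_2d
-- ===== SOURCE A (Python) =====
-- def max_even_2d(list):
--     even = []
--     for x in list:
--         for index in x:
--             if index % 2 == 0:
--                 even.append(index)
--     if even == []:
--         return None
--
--     maximum = even[0]
--     for num in even:
--         if num > maximum:
--             maximum = num
--     return maximum
-- ===== SOURCE B (Python) =====
-- def max_even_2d(list):
--     maximum = None
--     for row in list:
--         for element in row:
--             if element % 2 == 0 and (maximum is None or element > maximum):
--                 maximum = element
--     return maximum
-- ===== Notes on version B (the rewrite author's own statement) =====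
-- stated objective: simpler
-- what changed: Single pass keeping a running Optional maximum instead of building the list of evens and then scanning it for the max.
import Mathlib
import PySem

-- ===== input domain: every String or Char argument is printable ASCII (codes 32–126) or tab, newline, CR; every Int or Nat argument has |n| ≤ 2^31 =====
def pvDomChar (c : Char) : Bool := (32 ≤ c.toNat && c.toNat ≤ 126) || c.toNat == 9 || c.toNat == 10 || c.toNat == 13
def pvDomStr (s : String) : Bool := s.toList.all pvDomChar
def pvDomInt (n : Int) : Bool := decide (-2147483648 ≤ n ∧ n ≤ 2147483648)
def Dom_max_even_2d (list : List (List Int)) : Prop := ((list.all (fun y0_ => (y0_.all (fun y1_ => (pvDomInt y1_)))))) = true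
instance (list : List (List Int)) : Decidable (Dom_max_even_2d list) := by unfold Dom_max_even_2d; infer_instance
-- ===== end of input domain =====

-- B replaces A's build-the-list-of-evens-then-scan with a single pass keeping a running Option maximum (simpler, O(1) extra space).

-- ===== PORT A =====
def max_even_2d (list : List (List Int)) : Option Int :=
  let even : List Int :=
    list.foldl (fun ev x =>
      x.foldl (fun ev index => if index % 2 == 0 then ev ++ [index] else ev) ev) []
  match even with
  | [] => none
  | h :: _ =>
    some (even.foldl (fun maximum num => if num > maximum then num else maximum) h)

-- ===== PORT B =====
def max_even_2d_alt (list : List (List Int)) : Option Int :=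
  list.foldl (fun maximum row =>
    row.foldl (fun maximum element =>
      if element % 2 == 0 then
        match maximum with
        | none => some element
        | some v => if element > v then some element else some v
      else maximum) maximum) none

-- ===== PRECONDITION & SPEC =====
def Spec_max_even_2d (list : List (List Int)) (out : Option Int) : Prop := out = max_even_2d_alt list
instance (list : List (List Int)) (out : Option Int) : Decidable (Spec_max_even_2d list out) := by unfold Spec_max_even_2d; infer_instance

-- ===== CLAIM (what is proved, stated in full; the proofs are below) =====
def Claim_equal_max_even_2d : Prop := ∀ (list : List (List Int)), Dom_max_even_2d list → Spec_max_even_2d list (max_even_2d list)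

-- ===== LEMMAS AND PROOFS =====

def pvG (m : Option Int) (n : Int) : Option Int :=
  match m with
  | none => some n
  | some v => if n > v then some n else some v

def pvEvens (list : List (List Int)) : List Int :=
  list.flatMap (fun r => r.filter (fun i => i % 2 == 0))

theorem pvB_row (r : List Int) (m : Option Int) :
    r.foldl (fun maximum element =>
      if element % 2 == 0 then
        match maximum with
        | none => some element
        | some v => if element > v then some element else some v
      else maximum) m
    = (r.filter (fun i => i % 2 == 0)).foldl pvG m := by
  induction r generalizing m with
  | nil => rfl
  | cons a t ih =>
    simp only [List.foldl_cons, List.filter_cons]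
    by_cases h : (a % 2 == 0) = true
    · rw [if_pos h, if_pos h, List.foldl_cons, ih]; rfl
    · rw [if_neg h, if_neg h, ih]

theorem pvB_eq (list : List (List Int)) :
    max_even_2d_alt list = (pvEvens list).foldl pvG none := by
  unfold max_even_2d_alt pvEvens
  generalize (none : Option Int) = m
  induction list generalizing m with
  | nil => rfl
  | cons r t ih =>
    rw [List.foldl_cons, List.flatMap_cons, List.foldl_append, pvB_row, ih]

theorem pvA_row (r : List Int) (ev : List Int) :
    r.foldl (fun ev index => if index % 2 == 0 then ev ++ [index] else ev) ev
    = ev ++ r.filter (fun i => i % 2 == 0) := by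
  induction r generalizing ev with
  | nil => simp
  | cons a t ih =>
    simp only [List.foldl_cons, List.filter_cons]
    by_cases h : (a % 2 == 0) = true
    · rw [if_pos h, if_pos h, ih, List.append_assoc]; rfl
    · rw [if_neg h, if_neg h, ih]

theorem pvA_collect (list : List (List Int)) (ev : List Int) :
    list.foldl (fun ev x =>
      x.foldl (fun ev index => if index % 2 == 0 then ev ++ [index] else ev) ev) ev
    = ev ++ pvEvens list := by
  induction list generalizing ev with
  | nil => simp [pvEvens]
  | cons r t ih =>
    rw [List.foldl_cons, pvA_row, ih]
    unfold pvEvens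
    rw [List.flatMap_cons, List.append_assoc]

theorem pvMaxscan (t : List Int) (h : Int) :
    t.foldl pvG (some h)
    = some (t.foldl (fun maximum num => if num > maximum then num else maximum) h) := by
  induction t generalizing h with
  | nil => rfl
  | cons a t ih =>
    rw [List.foldl_cons, List.foldl_cons]
    show t.foldl pvG (if a > h then some a else some h) = _
    by_cases hc : a > h
    · rw [if_pos hc, if_pos hc, ih]
    · rw [if_neg hc, if_neg hc, ih]

-- ===== VERDICT (by name: the statement is the Claim_ definition above) =====
theorem max_even_2d_spec : Claim_equal_max_even_2d := by
  intro list _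
  show max_even_2d list = max_even_2d_alt list
  rw [pvB_eq]
  unfold max_even_2d
  simp only [pvA_collect, List.nil_append]
  cases hev : pvEvens list with
  | nil => rfl
  | cons h t =>
    show some (List.foldl (fun maximum num => if num > maximum then num else maximum) h (h :: t))
       = List.foldl pvG none (h :: t)
    rw [List.foldl_cons, List.foldl_cons, show pvG none h = some h from rfl, pvMaxscan,
        if_neg (lt_irrefl h)]
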